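-- pv_equiv track=rewrite | github.com/chadananda/xswarm-boss | packages/assistant/assistant/dashboard_widgets.py | _detect_message_type
-- ===== SOURCE A (Python) =====
-- def _detect_message_type(message: str) -> str:
--     """Auto-detect message type from keywords"""
--     message_lower = message.lower()
--
--     if any(word in message_lower for word in ["error", "failed", "fail", "critical"]):
--         return "error"
--     elif any(word in message_lower for word in ["warning", "warn", "caution"]):
--         return "warning"
--     elif any(word in message_lower for word in ["success", "complete", "loaded", "ready", "connected"]):
--         return "success"
--     elif any(word in message_lower for word in ["initializing", "loading", "starting", "booting"]):
--         return "system"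
--     else:
--         return "info"
-- ===== SOURCE B (Python) =====
-- # Single-pass position scanner: walk the lowered message once, at each index note which
-- # keywords start there, and keep the best (lowest) priority seen; label that priority.
-- _KEYWORD_PRIORITY = {
--     "error": 0, "failed": 0, "fail": 0, "critical": 0,
--     "warning": 1, "warn": 1, "caution": 1,
--     "success": 2, "complete": 2, "loaded": 2, "ready": 2, "connected": 2,
--     "initializing": 3, "loading": 3, "starting": 3, "booting": 3,
-- }
-- _LABELS = ["error", "warning", "success", "system", "info"]
--
-- def _detect_message_type(message: str) -> str:
--     m = message.lower()
--     best = 4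
--     for i in range(len(m)):
--         for kw, p in _KEYWORD_PRIORITY.items():
--             if p < best and m.startswith(kw, i):
--                 best = p
--     return _LABELS[best]
-- ===== Notes on version B (the rewrite author's own statement) =====
-- stated objective: alternative
-- what changed: Replaces the per-group any-substring if/elif chain with a single left-to-right scan of the lowered message that, at each position, checks which keywords start there and accumulates the minimum priority index, labelling the best priority found.
import Mathlib
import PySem

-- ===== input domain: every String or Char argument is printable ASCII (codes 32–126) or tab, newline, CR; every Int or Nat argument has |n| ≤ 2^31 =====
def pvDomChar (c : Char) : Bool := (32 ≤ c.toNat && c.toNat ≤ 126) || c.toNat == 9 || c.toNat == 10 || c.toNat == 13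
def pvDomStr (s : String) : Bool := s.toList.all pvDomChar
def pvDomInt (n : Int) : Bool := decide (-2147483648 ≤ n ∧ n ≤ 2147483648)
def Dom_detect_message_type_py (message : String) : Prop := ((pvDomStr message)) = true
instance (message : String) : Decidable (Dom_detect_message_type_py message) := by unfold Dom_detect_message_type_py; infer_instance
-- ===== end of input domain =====

-- B replaces A's per-group any-substring if/elif chain by one left-to-right scan over the
-- positions of the lowered message that accumulates the minimum matched keyword priority.
-- ===== PORT A =====
def detect_message_type_py (message : String) : String :=
  let message_lower := PySem.Str.lower message
  if ["error", "failed", "fail", "critical"].any (fun word => PySem.Str.isIn word message_lower) then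
    "error"
  else if ["warning", "warn", "caution"].any (fun word => PySem.Str.isIn word message_lower) then
    "warning"
  else if ["success", "complete", "loaded", "ready", "connected"].any (fun word => PySem.Str.isIn word message_lower) then
    "success"
  else if ["initializing", "loading", "starting", "booting"].any (fun word => PySem.Str.isIn word message_lower) then
    "system"
  else
    "info"

-- ===== PORT B =====
-- the _KEYWORD_PRIORITY dict of Source B (insertion order), keys as character lists
def pvKeywordPriority : List (List Char × Nat) :=
  [(['e','r','r','o','r'], 0), (['f','a','i','l','e','d'], 0), (['f','a','i','l'], 0), (['c','r','i','t','i','c','a','l'], 0),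
   (['w','a','r','n','i','n','g'], 1), (['w','a','r','n'], 1), (['c','a','u','t','i','o','n'], 1),
   (['s','u','c','c','e','s','s'], 2), (['c','o','m','p','l','e','t','e'], 2), (['l','o','a','d','e','d'], 2),
   (['r','e','a','d','y'], 2), (['c','o','n','n','e','c','t','e','d'], 2),
   (['i','n','i','t','i','a','l','i','z','i','n','g'], 3), (['l','o','a','d','i','n','g'], 3),
   (['s','t','a','r','t','i','n','g'], 3), (['b','o','o','t','i','n','g'], 3)]

def pvLabels : List String := ["error", "warning", "success", "system", "info"]

-- inner loop of Source B at one position i: m.startswith(kw, i) is 'kw is a prefix of the suffix at i'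
def pvBestAt (s : List Char) (best : Nat) : Nat :=
  pvKeywordPriority.foldl (fun b kwp => if kwp.2 < b ∧ kwp.1.isPrefixOf s then kwp.2 else b) best

-- outer loop of Source B: 'for i in range(len(m))' = the nonempty suffixes of m, left to right
def pvScan (m : List Char) (best : Nat) : Nat :=
  (m.tails.dropLast).foldl (fun b s => pvBestAt s b) best

def detect_message_type_py_alt (message : String) : String :=
  pvLabels.getD (pvScan (PySem.Str.lower message).toList 4) "info"

-- ===== PRECONDITION & SPEC =====
def Spec_detect_message_type_py (message : String) (out : String) : Prop := out = detect_message_type_py_alt message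
instance (message : String) (out : String) : Decidable (Spec_detect_message_type_py message out) := by unfold Spec_detect_message_type_py; infer_instance

-- ===== CLAIM (what is proved, stated in full; the proofs are below) =====
def Claim_equal_detect_message_type_py : Prop := ∀ (message : String), Dom_detect_message_type_py message → Spec_detect_message_type_py message (detect_message_type_py message)

-- ===== LEMMAS AND PROOFS =====

theorem pvScan_nil (b : Nat) : pvScan [] b = b := by simp [pvScan]

theorem pvScan_cons (b : Nat) (c : Char) (r : List Char) :
    pvScan (c :: r) b = pvScan r (pvBestAt (c :: r) b) := by
  unfold pvScan
  rw [List.tails_cons, List.dropLast_cons_of_ne_nil (by cases r <;> simp), List.foldl_cons]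

-- the inner fold computes the min of the start value and the priorities of keywords prefixing s
theorem pvFold_le_iff (s : List Char) (L : List (List Char × Nat)) (best p : Nat) :
    L.foldl (fun b kwp => if kwp.2 < b ∧ kwp.1.isPrefixOf s then kwp.2 else b) best ≤ p ↔
      best ≤ p ∨ ∃ kwp ∈ L, kwp.2 ≤ p ∧ kwp.1.isPrefixOf s := by
  induction L generalizing best with
  | nil => simp
  | cons x L ih =>
    simp only [List.foldl_cons, ih, List.mem_cons]
    constructor
    · rintro (h | ⟨kwp, hm, hk⟩)
      · split_ifs at h with hc
        · exact Or.inr ⟨x, Or.inl rfl, by omega, hc.2⟩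
        · exact Or.inl h
      · exact Or.inr ⟨kwp, Or.inr hm, hk⟩
    · rintro (h | ⟨kwp, (rfl | hm), hk⟩)
      · left; split_ifs with hc <;> omega
      · left; split_ifs with hc
        · omega
        · rcases hk with ⟨hk1, hk2⟩
          rcases Decidable.em (kwp.2 < best) with h2 | h2
          · exact absurd ⟨h2, hk2⟩ hc
          · omega
      · exact Or.inr ⟨kwp, hm, hk⟩

theorem pvBestAt_le_iff (s : List Char) (best p : Nat) :
    pvBestAt s best ≤ p ↔ best ≤ p ∨ ∃ kwp ∈ pvKeywordPriority, kwp.2 ≤ p ∧ kwp.1.isPrefixOf s :=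
  pvFold_le_iff s pvKeywordPriority best p

theorem pvKw_ne_nil : ∀ kwp ∈ pvKeywordPriority, kwp.1 ≠ [] := by decide

-- the scan computes the min of the start value and the priorities of keywords occurring as infixes
theorem pvScan_le_iff (m : List Char) (best p : Nat) :
    pvScan m best ≤ p ↔ best ≤ p ∨ ∃ kwp ∈ pvKeywordPriority, kwp.2 ≤ p ∧ kwp.1 <:+: m := by
  induction m generalizing best with
  | nil =>
    rw [pvScan_nil]
    constructor
    · exact Or.inl
    · rintro (h | ⟨kwp, hm, _, hinf⟩)
      · exact h
      · exact absurd (List.infix_nil.mp hinf) (pvKw_ne_nil kwp hm)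
  | cons c rest ih =>
    rw [pvScan_cons]
    simp only [ih, pvBestAt_le_iff, List.infix_cons_iff]
    constructor
    · rintro (h | ⟨kwp, hm, hk, hp⟩)
      · rcases h with h | ⟨kwp, hm, hk, hp⟩
        · exact Or.inl h
        · exact Or.inr ⟨kwp, hm, hk, Or.inl (List.isPrefixOf_iff_prefix.mp hp)⟩
      · exact Or.inr ⟨kwp, hm, hk, Or.inr hp⟩
    · rintro (h | ⟨kwp, hm, hk, hpre | hinf⟩)
      · exact Or.inl (Or.inl h)
      · exact Or.inl (Or.inr ⟨kwp, hm, hk, List.isPrefixOf_iff_prefix.mpr hpre⟩)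
      · exact Or.inr ⟨kwp, hm, hk, hinf⟩

-- group-by-group bridge: A's any-isIn tests versus thresholds of B's scanned minimum
theorem pv_le0_iff (L : String) :
    pvScan L.toList 4 ≤ 0 ↔
      (["error", "failed", "fail", "critical"].any fun w => PySem.Str.isIn w L) = true := by
  rw [pvScan_le_iff]
  simp [pvKeywordPriority, PySem.Chars.isIn_iff_infix]

theorem pv_le1_iff (L : String) :
    pvScan L.toList 4 ≤ 1 ↔
      ((["error", "failed", "fail", "critical"].any fun w => PySem.Str.isIn w L) = true ∨
       (["warning", "warn", "caution"].any fun w => PySem.Str.isIn w L) = true) := by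
  rw [pvScan_le_iff]
  simp [pvKeywordPriority, PySem.Chars.isIn_iff_infix]
  tauto

theorem pv_le2_iff (L : String) :
    pvScan L.toList 4 ≤ 2 ↔
      ((["error", "failed", "fail", "critical"].any fun w => PySem.Str.isIn w L) = true ∨
       (["warning", "warn", "caution"].any fun w => PySem.Str.isIn w L) = true ∨
       (["success", "complete", "loaded", "ready", "connected"].any fun w => PySem.Str.isIn w L) = true) := by
  rw [pvScan_le_iff]
  simp [pvKeywordPriority, PySem.Chars.isIn_iff_infix]
  tauto

theorem pv_le3_iff (L : String) :
    pvScan L.toList 4 ≤ 3 ↔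
      ((["error", "failed", "fail", "critical"].any fun w => PySem.Str.isIn w L) = true ∨
       (["warning", "warn", "caution"].any fun w => PySem.Str.isIn w L) = true ∨
       (["success", "complete", "loaded", "ready", "connected"].any fun w => PySem.Str.isIn w L) = true ∨
       (["initializing", "loading", "starting", "booting"].any fun w => PySem.Str.isIn w L) = true) := by
  rw [pvScan_le_iff]
  simp [pvKeywordPriority, PySem.Chars.isIn_iff_infix]
  tauto

-- ===== VERDICT (by name: the statement is the Claim_ definition above) =====
theorem detect_message_type_py_spec : Claim_equal_detect_message_type_py := by
  intro message _
  unfold Spec_detect_message_type_py detect_message_type_py detect_message_type_py_alt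
  dsimp only
  set L := PySem.Str.lower message with hL
  have h4 : pvScan L.toList 4 ≤ 4 := (pvScan_le_iff _ 4 4).mpr (Or.inl le_rfl)
  by_cases g0 : (["error", "failed", "fail", "critical"].any fun word => PySem.Str.isIn word L) = true
  · have hs : pvScan L.toList 4 = 0 := by
      have := (pv_le0_iff L).mpr g0; omega
    rw [if_pos g0, hs]
    rfl
  · by_cases g1 : (["warning", "warn", "caution"].any fun word => PySem.Str.isIn word L) = true
    · have hs : pvScan L.toList 4 = 1 := by
        have h1 := (pv_le1_iff L).mpr (Or.inr g1)
        have h0 := (pv_le0_iff L).not.mpr g0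
        omega
      rw [if_neg g0, if_pos g1, hs]
      rfl
    · by_cases g2 : (["success", "complete", "loaded", "ready", "connected"].any fun word => PySem.Str.isIn word L) = true
      · have hs : pvScan L.toList 4 = 2 := by
          have h2 := (pv_le2_iff L).mpr (Or.inr (Or.inr g2))
          have h1 := (pv_le1_iff L).not.mpr (not_or.mpr ⟨g0, g1⟩)
          omega
        rw [if_neg g0, if_neg g1, if_pos g2, hs]
        rfl
      · by_cases g3 : (["initializing", "loading", "starting", "booting"].any fun word => PySem.Str.isIn word L) = true
        · have hs : pvScan L.toList 4 = 3 := by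
            have h3 := (pv_le3_iff L).mpr (Or.inr (Or.inr (Or.inr g3)))
            have h2 := (pv_le2_iff L).not.mpr (not_or.mpr ⟨g0, not_or.mpr ⟨g1, g2⟩⟩)
            omega
          rw [if_neg g0, if_neg g1, if_neg g2, if_pos g3, hs]
          rfl
        · have hs : pvScan L.toList 4 = 4 := by
            have h3 := (pv_le3_iff L).not.mpr (not_or.mpr ⟨g0, not_or.mpr ⟨g1, not_or.mpr ⟨g2, g3⟩⟩⟩)
            omega
          rw [if_neg g0, if_neg g1, if_neg g2, if_neg g3, hs]
          rfl
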